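-- pv_equiv track=rewrite | github.com/IlyaLazowski/labs_OKS | test.py | replace_r
-- ===== SOURCE A (Python) =====
-- def replace_r(input_string):
--     if '$u' in input_string and not input_string.startswith('$u'):
--         input_string = input_string.replace('$u', 'r-')
--
--     result = ""
--     length = len(input_string)
--
--     for i in range(length):
--         # Если текущий символ 'r' и следующий не '-', заменяем на 'r+'
--         if input_string[i] == 'r':
--             if i + 1 < length and input_string[i + 1] == '-':
--                 result += 'r'  # Оставляем 'r' как есть
--             else:
--                 result += 'r+'  # Заменяем 'r' на 'r+'
--         else:
--             result += input_string[i]  # Добавляем текущий символ как есть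
--
--     return result
-- ===== SOURCE B (Python) =====
-- def replace_r(input_string):
--     if '$u' in input_string and not input_string.startswith('$u'):
--         input_string = input_string.replace('$u', 'r-')
--     # Every 'r' becomes 'r+'; where the original 'r' was followed by '-' this
--     # produced 'r+-', which can only arise that way, so undo exactly those.
--     return input_string.replace('r', 'r+').replace('r+-', 'r-')
-- ===== Notes on version B (the rewrite author's own statement) =====
-- stated objective: idiomatic
-- what changed: Replaces the index loop with per-character lookahead and string accumulation by two global substring substitutions: 'r' -> 'r+' everywhere, then undoing exactly the 'r+-' occurrences (which can only come from an original 'r-') back to 'r-'.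
import Mathlib
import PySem

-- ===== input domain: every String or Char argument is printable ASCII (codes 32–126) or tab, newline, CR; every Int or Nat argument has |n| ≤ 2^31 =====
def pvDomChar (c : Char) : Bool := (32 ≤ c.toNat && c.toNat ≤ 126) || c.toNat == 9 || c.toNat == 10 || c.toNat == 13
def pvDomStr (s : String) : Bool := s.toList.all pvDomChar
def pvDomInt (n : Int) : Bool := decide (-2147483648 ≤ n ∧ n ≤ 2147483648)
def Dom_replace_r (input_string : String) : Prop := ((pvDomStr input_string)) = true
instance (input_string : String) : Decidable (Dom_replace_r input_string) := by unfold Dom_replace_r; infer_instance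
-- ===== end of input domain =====

-- B replaces A's per-character lookahead loop by two global substring substitutions
-- ('r' → 'r+', then 'r+-' → 'r-'); objective: idiomatic, same return value.

-- ===== PORT A =====
def replace_r (input_string : String) : String :=
  let input_string :=
    if PySem.Str.isIn "$u" input_string && !(PySem.Str.startswith input_string "$u") then
      PySem.Str.replace input_string "$u" "r-"
    else input_string
  let cs := input_string.toList
  let length := cs.length
  let result : List Char :=
    (PySem.List.pyRange 0 (length : Int) 1).foldl
      (fun result i =>
        match PySem.List.pyGet? cs i with
        | none => result
        | some c =>
          if c = 'r' then
            if decide (i + 1 < (length : Int)) && (PySem.List.pyGet? cs (i + 1) == some '-') then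
              result ++ ['r']
            else
              result ++ ['r', '+']
          else result ++ [c])
      []
  String.ofList result

-- ===== PORT B =====
def replace_r_alt (input_string : String) : String :=
  let input_string :=
    if PySem.Str.isIn "$u" input_string && !(PySem.Str.startswith input_string "$u") then
      PySem.Str.replace input_string "$u" "r-"
    else input_string
  PySem.Str.replace (PySem.Str.replace input_string "r" "r+") "r+-" "r-"

-- ===== PRECONDITION & SPEC =====
def Spec_replace_r (input_string : String) (out : String) : Prop := out = replace_r_alt input_string
instance (input_string : String) (out : String) : Decidable (Spec_replace_r input_string out) := by unfold Spec_replace_r; infer_instance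

-- ===== CLAIM (what is proved, stated in full; the proofs are below) =====
def Claim_equal_replace_r : Prop := ∀ (input_string : String), Dom_replace_r input_string → Spec_replace_r input_string (replace_r input_string)

-- ===== LEMMAS AND PROOFS =====

-- What A's loop computes, as a structural recursion on the character list.
def aRec : List Char → List Char
  | [] => []
  | c :: t => (if c = 'r' ∧ t.head? ≠ some '-' then ['r', '+'] else [c]) ++ aRec t

-- Pure recursive form of PySem.Chars.replace (agrees with it for nonempty `old`).
def rep (old new : List Char) : List Char → List Char
  | [] => []
  | c :: t =>
    if old.isPrefixOf (c :: t) then new ++ rep old new (t.drop (old.length - 1))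
    else c :: rep old new t
termination_by l => l.length
decreasing_by
  · simp only [List.length_cons, List.length_drop]; omega
  · simp

lemma go_spec (old new : List Char) (h : old ≠ []) :
    ∀ (fuel : Nat) (l acc : List Char), l.length ≤ fuel →
      PySem.Chars.replace.go old new fuel l acc = acc.reverse ++ rep old new l := by
  intro fuel
  induction fuel with
  | zero =>
    intro l acc hl
    have : l = [] := List.eq_nil_of_length_eq_zero (Nat.le_zero.mp hl)
    subst this
    simp [PySem.Chars.replace.go, rep]
  | succ n ih =>
    intro l acc hl
    match l with
    | [] => simp [PySem.Chars.replace.go, rep]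
    | c :: t =>
      rw [PySem.Chars.replace.go]
      have hlen : 1 ≤ old.length := by
        cases old with
        | nil => exact absurd rfl h
        | cons a b => simp
      by_cases hp : old.isPrefixOf (c :: t)
      · simp only [hp, if_true]
        have hdrop : (c :: t).drop old.length = t.drop (old.length - 1) := by
          have : old.length = (old.length - 1) + 1 := by omega
          rw [this]; simp
        rw [hdrop, ih _ _ (by simp only [List.length_drop, List.length_cons] at hl ⊢; omega)]
        rw [rep]
        simp [hp]
      · rw [if_neg hp, ih _ _ (by simp only [List.length_cons] at hl; omega), rep, if_neg hp]
        simp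

lemma replace_eq_rep (cs old new : List Char) (h : old ≠ []) :
    PySem.Chars.replace cs old new = rep old new cs := by
  rw [PySem.Chars.replace]
  have he : old.isEmpty = false := by cases old <;> simp_all
  rw [he]
  simp only [Bool.false_eq_true, if_false]
  exact go_spec old new h cs.length cs [] (le_refl _)

-- unfolding equations for the two concrete substitutions
lemma rep1_cons_r (t : List Char) :
    rep ['r'] ['r', '+'] ('r' :: t) = 'r' :: '+' :: rep ['r'] ['r', '+'] t := by
  rw [rep]; simp [List.isPrefixOf]

lemma rep1_cons_ne {c : Char} (hc : c ≠ 'r') (t : List Char) :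
    rep ['r'] ['r', '+'] (c :: t) = c :: rep ['r'] ['r', '+'] t := by
  have hp : (['r'] : List Char).isPrefixOf (c :: t) = false := by
    simp [List.isPrefixOf]
    exact fun h => hc h.symm
  rw [rep]; simp [hp]

lemma rep2_cons_ne {c : Char} (hc : c ≠ 'r') (t : List Char) :
    rep ['r', '+', '-'] ['r', '-'] (c :: t) = c :: rep ['r', '+', '-'] ['r', '-'] t := by
  have hp : (['r', '+', '-'] : List Char).isPrefixOf (c :: t) = false := by
    simp [List.isPrefixOf]
    intro h
    exact absurd h.symm hc
  rw [rep]; simp [hp]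

lemma rep2_match (t : List Char) :
    rep ['r', '+', '-'] ['r', '-'] ('r' :: '+' :: '-' :: t)
      = 'r' :: '-' :: rep ['r', '+', '-'] ['r', '-'] t := by
  rw [rep]; simp [List.isPrefixOf]

lemma rep2_nomatch (x : List Char) (hx : x.head? ≠ some '-') :
    rep ['r', '+', '-'] ['r', '-'] ('r' :: '+' :: x)
      = 'r' :: '+' :: rep ['r', '+', '-'] ['r', '-'] x := by
  have hp : (['r', '+', '-'] : List Char).isPrefixOf ('r' :: '+' :: x) = false := by
    cases x with
    | nil => simp [List.isPrefixOf]
    | cons a y =>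
      simp only [List.head?_cons, ne_eq, Option.some.injEq] at hx
      simp [List.isPrefixOf]
      exact fun h => hx h.symm
  rw [rep]
  simp only [hp, Bool.false_eq_true, if_false]
  rw [rep]
  simp [List.isPrefixOf]

-- rep with the single-char pattern 'r' preserves the head character.
lemma head_rep1 (t : List Char) :
    (rep ['r'] ['r', '+'] t).head? = t.head? := by
  cases t with
  | nil => simp [rep]
  | cons c t =>
    by_cases hc : c = 'r'
    · subst hc; rw [rep1_cons_r]; simp
    · rw [rep1_cons_ne hc]; simp

-- The two substitutions compose to exactly A's scan.
lemma comp_eq_aRec (cs : List Char) :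
    rep ['r', '+', '-'] ['r', '-'] (rep ['r'] ['r', '+'] cs) = aRec cs := by
  induction cs with
  | nil => simp [rep, aRec]
  | cons c t ih =>
    by_cases hc : c = 'r'
    · subst hc
      by_cases hd : t.head? = some '-'
      · obtain ⟨t', rfl⟩ : ∃ t', t = '-' :: t' := by
          cases t with
          | nil => simp at hd
          | cons a t' =>
            simp only [List.head?_cons, Option.some.injEq] at hd
            exact ⟨t', by rw [hd]⟩
        rw [rep1_cons_ne (by decide) t', rep2_cons_ne (by decide)] at ih
        rw [aRec, if_neg (fun h => absurd h.1 (by decide))] at ih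
        simp only [List.singleton_append, List.cons.injEq, true_and] at ih
        rw [rep1_cons_r, rep1_cons_ne (by decide) t', rep2_match, ih]
        rw [aRec, aRec]
        simp
      · rw [rep1_cons_r, rep2_nomatch _ (by rw [head_rep1]; exact hd)]
        rw [aRec]
        simp [hd, ih]
    · rw [rep1_cons_ne hc, rep2_cons_ne hc, ih, aRec]
      simp [hc]

-- A's foldl over the index range equals aRec on the dropped suffix.
lemma loop_eq (cs : List Char) : ∀ (n k : Nat) (acc : List Char),
    cs.length - k = n →
    (PySem.List.pyRange (k : Int) (cs.length : Int) 1).foldl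
      (fun result i =>
        match PySem.List.pyGet? cs i with
        | none => result
        | some c =>
          if c = 'r' then
            if decide (i + 1 < ((cs.length : Nat) : Int)) && (PySem.List.pyGet? cs (i + 1) == some '-') then
              result ++ ['r']
            else
              result ++ ['r', '+']
          else result ++ [c])
      acc = acc ++ aRec (cs.drop k) := by
  intro n
  induction n with
  | zero =>
    intro k acc h
    have hk : cs.length ≤ k := by omega
    rw [PySem.List.pyRange_one_eq_nil (by exact_mod_cast hk)]
    rw [List.drop_eq_nil_of_le hk]
    simp [aRec]
  | succ n ih =>
    intro k acc h
    have hk : k < cs.length := by omega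
    rw [PySem.List.pyRange_one_cons (by exact_mod_cast hk)]
    rw [List.foldl_cons]
    have hcast : ((k : Int) + 1) = (((k + 1 : Nat)) : Int) := by push_cast; ring
    rw [hcast]
    rw [ih (k + 1) _ (by omega)]
    have hget : PySem.List.pyGet? cs (k : Int) = some cs[k] := by
      rw [PySem.List.pyGet?_natCast]
      exact List.getElem?_eq_getElem hk
    have hdropk : cs.drop k = cs[k] :: cs.drop (k + 1) := List.drop_eq_getElem_cons hk
    have hcond : (decide (((k + 1 : Nat) : Int) < ((cs.length : Nat) : Int))
        && (PySem.List.pyGet? cs ((k + 1 : Nat) : Int) == some '-'))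
        = ((cs.drop (k + 1)).head? == some '-') := by
      rw [PySem.List.pyGet?_natCast]
      by_cases h1 : k + 1 < cs.length
      · have h2 : decide (((k + 1 : Nat) : Int) < ((cs.length : Nat) : Int)) = true := by
          rw [decide_eq_true_iff]; exact_mod_cast h1
        rw [List.head?_drop, h2, Bool.true_and]
      · have h0 : cs.drop (k + 1) = [] := List.drop_eq_nil_of_le (by omega)
        have h2 : decide (((k + 1 : Nat) : Int) < ((cs.length : Nat) : Int)) = false := by
          rw [decide_eq_false_iff_not]
          intro hcc
          exact h1 (by exact_mod_cast hcc)
        rw [h0, h2, Bool.false_and]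
        simp
    rw [hget]
    simp only []
    rw [hdropk, aRec, hcond]
    by_cases hr : cs[k] = 'r' <;>
      by_cases hh : (cs.drop (k + 1)).head? = some '-' <;>
      simp [hr, hh, -List.head?_drop]

theorem core_eq (s : String) :
    String.ofList
      ((PySem.List.pyRange 0 ((s.toList.length : Nat) : Int) 1).foldl
        (fun result i =>
          match PySem.List.pyGet? s.toList i with
          | none => result
          | some c =>
            if c = 'r' then
              if decide (i + 1 < ((s.toList.length : Nat) : Int)) && (PySem.List.pyGet? s.toList (i + 1) == some '-') then
                result ++ ['r']
              else
                result ++ ['r', '+']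
            else result ++ [c])
        [])
      = PySem.Str.replace (PySem.Str.replace s "r" "r+") "r+-" "r-" := by
  have hl : ((0 : Int)) = ((0 : Nat) : Int) := rfl
  rw [hl, loop_eq s.toList (s.toList.length) 0 [] (by omega)]
  rw [PySem.Str.replace, PySem.Str.replace]
  congr 1
  rw [String.toList_ofList]
  rw [replace_eq_rep _ _ _ (by decide), replace_eq_rep _ _ _ (by decide)]
  rw [List.drop_zero, List.nil_append]
  rw [show ("r" : String).toList = ['r'] from rfl,
      show ("r+" : String).toList = ['r', '+'] from rfl,
      show ("r+-" : String).toList = ['r', '+', '-'] from rfl,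
      show ("r-" : String).toList = ['r', '-'] from rfl]
  exact (comp_eq_aRec s.toList).symm

-- ===== VERDICT (by name: the statement is the Claim_ definition above) =====
theorem replace_r_spec : Claim_equal_replace_r := by
  intro s _
  unfold Spec_replace_r replace_r replace_r_alt
  exact core_eq _
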